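-- pv_equiv track=rewrite | github.com/geoadmin/3d-forge | forge/lib/decoders.py | decodeIndices
-- ===== SOURCE A (Python) =====
-- def decodeIndices(indices):
--     out = []
--     highest = 0
--     for i in indices:
--         out.append(highest - i)
--         if i == 0:
--             highest += 1
--     return out
-- ===== SOURCE B (Python) =====
-- def decodeIndices(indices):
--     # Two-pass: exclusive prefix-count table of zeros, then a mapping pass.
--     prefix = [0] * (len(indices) + 1)
--     for k, i in enumerate(indices):
--         prefix[k + 1] = prefix[k] + (1 if i == 0 else 0)
--     return [prefix[k] - i for k, i in enumerate(indices)]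
-- ===== Notes on version B (the rewrite author's own statement) =====
-- stated objective: alternative
-- what changed: Replaces the single stateful loop (running 'highest' counter interleaved with output appends) by a two-pass scheme: first materialize an exclusive prefix-count table of zero positions, then map each index to prefix[k]-i.
import Mathlib
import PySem

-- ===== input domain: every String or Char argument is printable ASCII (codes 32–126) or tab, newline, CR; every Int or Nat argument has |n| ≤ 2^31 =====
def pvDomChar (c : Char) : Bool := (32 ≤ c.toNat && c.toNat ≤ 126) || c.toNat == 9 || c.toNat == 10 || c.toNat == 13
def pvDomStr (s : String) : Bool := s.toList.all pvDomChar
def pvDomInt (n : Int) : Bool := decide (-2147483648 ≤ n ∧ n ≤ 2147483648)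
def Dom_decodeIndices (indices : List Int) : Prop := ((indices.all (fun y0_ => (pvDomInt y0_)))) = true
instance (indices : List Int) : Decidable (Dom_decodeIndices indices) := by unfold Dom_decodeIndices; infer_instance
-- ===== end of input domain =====

-- B replaces A's single stateful loop by a two-pass prefix-count table + mapping pass (alternative decomposition, same cost).


-- ===== PORT A =====
-- state = (out, highest); loop appends highest - i and bumps highest on zeros
def decodeIndices (indices : List Int) : List Int :=
  (indices.foldl
    (fun (s : List Int × Int) i =>
      (s.1 ++ [s.2 - i], if i == 0 then s.2 + 1 else s.2))
    ([], 0)).1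

-- ===== PORT B =====
-- prefix[k+1] = prefix[k] + (1 if i == 0 else 0); returns the tail of the prefix table (indexed from the running acc)
def prefixZeros (l : List Int) (acc : Int) : List Int :=
  match l with
  | [] => []
  | i :: rest =>
      let acc' := acc + (if i == 0 then 1 else 0)
      acc' :: prefixZeros rest acc'

def decodeIndices_alt (indices : List Int) : List Int :=
  let pre : List Int := 0 :: prefixZeros indices 0
  (List.zip indices pre).map (fun p => p.2 - p.1)

-- ===== PRECONDITION & SPEC =====
def Spec_decodeIndices (indices : List Int) (out : List Int) : Prop := out = decodeIndices_alt indices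
instance (indices : List Int) (out : List Int) : Decidable (Spec_decodeIndices indices out) := by unfold Spec_decodeIndices; infer_instance

-- ===== CLAIM (what is proved, stated in full; the proofs are below) =====
def Claim_equal_decodeIndices : Prop := ∀ (indices : List Int), Dom_decodeIndices indices → Spec_decodeIndices indices (decodeIndices indices)

-- ===== LEMMAS AND PROOFS =====
theorem decodeIndices_fold_eq (l : List Int) :
    ∀ (out : List Int) (h : Int),
      (l.foldl
        (fun (s : List Int × Int) i =>
          (s.1 ++ [s.2 - i], if i == 0 then s.2 + 1 else s.2))
        (out, h)).1
      = out ++ (List.zip l (h :: prefixZeros l h)).map (fun p => p.2 - p.1) := by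
  induction l with
  | nil => intro out h; simp
  | cons i rest ih =>
      intro out h
      have hacc : (if i == 0 then h + 1 else h) = h + (if i == 0 then 1 else 0) := by
        split <;> omega
      simp only [List.foldl_cons, prefixZeros, List.zip_cons_cons, List.map_cons]
      rw [ih, hacc]
      simp

theorem decodeIndices_spec : Claim_equal_decodeIndices := by
  intro indices _
  unfold Spec_decodeIndices decodeIndices decodeIndices_alt
  rw [decodeIndices_fold_eq]
  simp
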